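-- pv_equiv track=rewrite | github.com/megatrommendes/MegaPetz | Model/DAO/FuncoesAuxiliares/FormataData.py | formatar_data
-- ===== SOURCE A (Python) =====
-- def formatar_data(text):
--     # Remove caracteres não numéricos
--     text = ''.join(filter(str.isdigit, text))
--
--     if len(text) > 8:
--         # Limita o tamanho do texto
--         text = text[:8]
--
--     formatted_text = ''
--     for i in range(len(text)):
--         if i == 2 or i == 4:
--             formatted_text += '/'
--         formatted_text += text[i]
--     return formatted_text
-- ===== SOURCE B (Python) =====
-- def formatar_data(text):
--     digits = ''.join(filter(str.isdigit, text))[:8]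
--     return '/'.join(filter(None, (digits[:2], digits[2:4], digits[4:])))
-- ===== Notes on version B (the rewrite author's own statement) =====
-- stated objective: simpler
-- what changed: Replaces the per-index loop with its slash-insertion conditionals by slicing the cleaned digit string into three fixed-width fields and joining the non-empty ones with a slash separator.
import Mathlib
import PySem

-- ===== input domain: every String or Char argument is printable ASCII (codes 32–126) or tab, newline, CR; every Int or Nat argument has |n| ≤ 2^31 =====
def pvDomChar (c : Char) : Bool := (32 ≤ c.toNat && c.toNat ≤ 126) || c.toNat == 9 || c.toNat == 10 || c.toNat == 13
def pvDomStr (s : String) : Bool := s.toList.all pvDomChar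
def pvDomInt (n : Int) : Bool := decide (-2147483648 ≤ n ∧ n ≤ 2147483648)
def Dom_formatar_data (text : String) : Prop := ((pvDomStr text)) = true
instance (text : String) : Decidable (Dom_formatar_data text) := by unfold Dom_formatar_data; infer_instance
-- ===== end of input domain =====

-- B replaces A's per-index loop (with its i==2/i==4 slash insertions) by slicing the cleaned,
-- capped digit string into three fixed-width fields and joining the non-empty ones with '/'; objective: simpler.

-- ===== PORT A =====
def formatar_data (text : String) : String :=
  let t := text.toList.filter PySem.Chars.isdigit
  let t := if t.length > 8 then PySem.List.slice t none (some 8) else t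
  let formatted := (PySem.List.pyRange 0 t.length 1).foldl
    (fun acc i =>
      (if i == 2 || i == 4 then acc ++ ['/'] else acc) ++ [PySem.List.pyGetD t i ' ']) []
  String.ofList formatted

-- ===== PORT B =====
def formatar_data_alt (text : String) : String :=
  let digits := PySem.List.slice (text.toList.filter PySem.Chars.isdigit) none (some 8)
  let fields := [PySem.List.slice digits none (some 2),
                 PySem.List.slice digits (some 2) (some 4),
                 PySem.List.slice digits (some 4) none]
  String.ofList (PySem.Chars.join ['/'] (fields.filter (fun f => f ≠ [])))

-- ===== PRECONDITION & SPEC =====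
def Spec_formatar_data (text : String) (out : String) : Prop := out = formatar_data_alt text
instance (text : String) (out : String) : Decidable (Spec_formatar_data text out) := by unfold Spec_formatar_data; infer_instance

-- ===== CLAIM (what is proved, stated in full; the proofs are below) =====
def Claim_equal_formatar_data : Prop := ∀ (text : String), Dom_formatar_data text → Spec_formatar_data text (formatar_data text)

-- ===== LEMMAS AND PROOFS =====

-- Both ports depend only on the capped digit list d (length ≤ 8); case-split on its shape.
lemma core_eq (d : List Char) (h : d.length ≤ 8) :
    (PySem.List.pyRange 0 d.length 1).foldl
      (fun acc i =>
        (if i == 2 || i == 4 then acc ++ ['/'] else acc) ++ [PySem.List.pyGetD d i ' ']) []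
    = PySem.Chars.join ['/']
        (([PySem.List.slice d none (some 2),
           PySem.List.slice d (some 2) (some 4),
           PySem.List.slice d (some 4) none]).filter (fun f => f ≠ [])) := by
  match d with
  | [] =>
    simp [PySem.List.pyRange_one_eq_nil, PySem.Chars.join, PySem.List.slice, PySem.List.clampIdx, List.intercalate]
  | [a] =>
    norm_num
    rw [show PySem.List.pyRange 0 1 1 = [0] from by decide]
    simp [List.foldl, PySem.List.pyGetD, PySem.List.pyGet?, PySem.List.pyIdx?, PySem.List.slice,
          PySem.List.clampIdx, PySem.Chars.join, List.intercalate]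
  | [a,b] =>
    norm_num
    rw [show PySem.List.pyRange 0 2 1 = [0,1] from by decide]
    simp [List.foldl, PySem.List.pyGetD, PySem.List.pyGet?, PySem.List.pyIdx?, PySem.List.slice,
          PySem.List.clampIdx, PySem.Chars.join, List.intercalate]
  | [a,b,c] =>
    norm_num
    rw [show PySem.List.pyRange 0 3 1 = [0,1,2] from by decide]
    simp [List.foldl, PySem.List.pyGetD, PySem.List.pyGet?, PySem.List.pyIdx?, PySem.List.slice,
          PySem.List.clampIdx, PySem.Chars.join, List.intercalate]
  | [a,b,c,e] =>
    norm_num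
    rw [show PySem.List.pyRange 0 4 1 = [0,1,2,3] from by decide]
    simp [List.foldl, PySem.List.pyGetD, PySem.List.pyGet?, PySem.List.pyIdx?, PySem.List.slice,
          PySem.List.clampIdx, PySem.Chars.join, List.intercalate]
  | [a,b,c,e,f] =>
    norm_num
    rw [show PySem.List.pyRange 0 5 1 = [0,1,2,3,4] from by decide]
    simp [List.foldl, PySem.List.pyGetD, PySem.List.pyGet?, PySem.List.pyIdx?, PySem.List.slice,
          PySem.List.clampIdx, PySem.Chars.join, List.intercalate]
  | [a,b,c,e,f,g] =>
    norm_num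
    rw [show PySem.List.pyRange 0 6 1 = [0,1,2,3,4,5] from by decide]
    simp [List.foldl, PySem.List.pyGetD, PySem.List.pyGet?, PySem.List.pyIdx?, PySem.List.slice,
          PySem.List.clampIdx, PySem.Chars.join, List.intercalate]
  | [a,b,c,e,f,g,i] =>
    norm_num
    rw [show PySem.List.pyRange 0 7 1 = [0,1,2,3,4,5,6] from by decide]
    simp [List.foldl, PySem.List.pyGetD, PySem.List.pyGet?, PySem.List.pyIdx?, PySem.List.slice,
          PySem.List.clampIdx, PySem.Chars.join, List.intercalate]
  | [a,b,c,e,f,g,i,j] =>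
    norm_num
    rw [show PySem.List.pyRange 0 8 1 = [0,1,2,3,4,5,6,7] from by decide]
    simp [List.foldl, PySem.List.pyGetD, PySem.List.pyGet?, PySem.List.pyIdx?, PySem.List.slice,
          PySem.List.clampIdx, PySem.Chars.join, List.intercalate]
  | _::_::_::_::_::_::_::_::_::_ =>
    simp only [List.length_cons] at h; omega

-- ===== VERDICT (by name: the statement is the Claim_ definition above) =====
theorem formatar_data_spec : Claim_equal_formatar_data := by
  intro text _
  unfold Spec_formatar_data formatar_data formatar_data_alt
  set t := text.toList.filter PySem.Chars.isdigit with ht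
  have hcap : (if t.length > 8 then PySem.List.slice t none (some 8) else t)
      = PySem.List.slice t none (some 8) := by
    split_ifs with h
    · rfl
    · simp [PySem.List.slice, PySem.List.clampIdx]
      omega
  simp only [hcap]
  have hlen : (PySem.List.slice t none (some 8)).length ≤ 8 := by
    simp [PySem.List.slice, PySem.List.clampIdx]
  exact congrArg String.ofList (core_eq _ hlen)
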